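-- pv_equiv track=rewrite | github.com/nishizumi-maho/nishizumi-setups-sync | nishizumi_setups_sync.py | identify_setup
-- ===== SOURCE A (Python) =====
-- CAR_MAP = {
--     "ir18 -> dallarair18": "dallarair18",
--     "aston gt4 -> amvantagegt4": "amvantagegt4",
--     "bmw gt4 evo -> bmwm4evogt4": "bmwm4evogt4",
--     "mclaren gt4 -> mclaren570sgt4": "mclaren570sgt4",
--     "bmw gt3 -> bmwm4gt3": "bmwm4gt3",
--     "mclaren gt3 -> mclaren720sgt3": "mclaren720sgt3",
--     "mclaren gtd -> mclaren720sgt3": "mclaren720sgt3",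
--     "acura gtp -> acuraarx06gtp": "acuraarx06gtp",
--     "audi gtd -> audir8lmsevo2gt3": "audir8lmsevo2gt3",
--     "audi gt3 -> audir8lmsevo2gt3": "audir8lmsevo2gt3",
--     "bmw gtd -> bmwm4gt3": "bmwm4gt3",
--     "bmw gtp -> bmwlmdh": "bmwlmdh",
--     "cadillac gtp -> cadillacvseriesrgtp": "cadillacvseriesrgtp",
--     "corvette gtd -> chevyvettez06rgt3": "chevyvettez06rgt3",
--     "corvette gt3 -> chevyvettez06rgt3": "chevyvettez06rgt3",
--     "dallara lmp2 -> dallarap217": "dallarap217",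
--     "ferrari 499p -> ferrari499p": "ferrari499p",
--     "ferrari gtd -> ferrari296gt3": "ferrari296gt3",
--     "ferrari gt3 -> ferrari296gt3": "ferrari296gt3",
--     "lamborghini gtd -> lamborghinievogt3": "lamborghinievogt3",
--     "lamborghini gt3 -> lamborghinievogt3": "lamborghinievogt3",
--     "mercedes gtd -> mercedesamgevogt3": "mercedesamgevogt3",
--     "mercedes gt3 -> mercedesamgevogt3": "mercedesamgevogt3",
--     "mustang gtd -> fordmustanggt3": "fordmustanggt3",
--     "mustang gt3 -> fordmustanggt3": "fordmustanggt3",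
--     "porsche gtd -> porsche992rgt3": "porsche992rgt3",
--     "porsche gt3 -> porsche992rgt3": "porsche992rgt3",
--     "porsche gtp -> porsche963gtp": "porsche963gtp",
--     "fia f4 -> formulair04": "formulair04",
--     "porsche gt4 -> porsche718gt4": "porsche718gt4",
--     "mercedes gt4 -> mercedesamggt4": "mercedesamggt4",
--     "lmp3 -> ligierjsp320": "ligierjsp320",
--     "sfl -> superformulalights324": "superformulalights324",
--     "pcup -> porsche992cup": "porsche992cup",
--     "porsche gte -> porsche991rsr": "porsche991rsr",
--     "corvette gte -> c8rvettegte": "c8rvettegte",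
--     "nsx gt3 -> acuransxevo22gt3": "acuransxevo22gt3",
--     "nsx gtd -> acuransxevo22gt3": "acuransxevo22gt3",
--     "nascar trucks": [
--         "nascar trucks -> trucks toyotatundra2022",
--         "nascar trucks -> trucks fordf150",
--         "nascar trucks -> trucks silverado2019",
--     ],
--     "nascar xfinity": [
--         "nascar xfinity -> stockcars2 supra2019",
--         "nascar xfinity -> stockcars2 mustang2019",
--         "nascar xfinity -> stockcars2 camaro2019",
--     ],
--     "nascar nextgen": [
--         "nascar nextgen -> stockcars chevycamarozl12022",
--         "nascar nextgen -> stockcars fordmustang2022",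
--         "nascar nextgen -> stockcars toyotacamry2022",
--     ],
-- }
--
-- def identify_setup(car_folder, custom_map):
--     parts = car_folder.split("-")
--     name = parts[1].strip().lower() if len(parts) >= 2 else car_folder.lower()
--     if name in custom_map:
--         return custom_map[name]
--     for key, dest in CAR_MAP.items():
--         if isinstance(dest, list):
--             for m in dest:
--                 clean = m.split("->")[-1].strip().lower()
--                 if key in name or clean in name:
--                     return clean
--         else:
--             s = key.split("->")[0].strip().lower()
--             d = str(dest).split("->")[-1].strip().lower()
--             if s in name or d in name:
--                 return d
--     return None
-- ===== SOURCE B (Python) =====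
-- CAR_MAP = {
--     "ir18 -> dallarair18": "dallarair18",
--     "aston gt4 -> amvantagegt4": "amvantagegt4",
--     "bmw gt4 evo -> bmwm4evogt4": "bmwm4evogt4",
--     "mclaren gt4 -> mclaren570sgt4": "mclaren570sgt4",
--     "bmw gt3 -> bmwm4gt3": "bmwm4gt3",
--     "mclaren gt3 -> mclaren720sgt3": "mclaren720sgt3",
--     "mclaren gtd -> mclaren720sgt3": "mclaren720sgt3",
--     "acura gtp -> acuraarx06gtp": "acuraarx06gtp",
--     "audi gtd -> audir8lmsevo2gt3": "audir8lmsevo2gt3",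
--     "audi gt3 -> audir8lmsevo2gt3": "audir8lmsevo2gt3",
--     "bmw gtd -> bmwm4gt3": "bmwm4gt3",
--     "bmw gtp -> bmwlmdh": "bmwlmdh",
--     "cadillac gtp -> cadillacvseriesrgtp": "cadillacvseriesrgtp",
--     "corvette gtd -> chevyvettez06rgt3": "chevyvettez06rgt3",
--     "corvette gt3 -> chevyvettez06rgt3": "chevyvettez06rgt3",
--     "dallara lmp2 -> dallarap217": "dallarap217",
--     "ferrari 499p -> ferrari499p": "ferrari499p",
--     "ferrari gtd -> ferrari296gt3": "ferrari296gt3",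
--     "ferrari gt3 -> ferrari296gt3": "ferrari296gt3",
--     "lamborghini gtd -> lamborghinievogt3": "lamborghinievogt3",
--     "lamborghini gt3 -> lamborghinievogt3": "lamborghinievogt3",
--     "mercedes gtd -> mercedesamgevogt3": "mercedesamgevogt3",
--     "mercedes gt3 -> mercedesamgevogt3": "mercedesamgevogt3",
--     "mustang gtd -> fordmustanggt3": "fordmustanggt3",
--     "mustang gt3 -> fordmustanggt3": "fordmustanggt3",
--     "porsche gtd -> porsche992rgt3": "porsche992rgt3",
--     "porsche gt3 -> porsche992rgt3": "porsche992rgt3",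
--     "porsche gtp -> porsche963gtp": "porsche963gtp",
--     "fia f4 -> formulair04": "formulair04",
--     "porsche gt4 -> porsche718gt4": "porsche718gt4",
--     "mercedes gt4 -> mercedesamggt4": "mercedesamggt4",
--     "lmp3 -> ligierjsp320": "ligierjsp320",
--     "sfl -> superformulalights324": "superformulalights324",
--     "pcup -> porsche992cup": "porsche992cup",
--     "porsche gte -> porsche991rsr": "porsche991rsr",
--     "corvette gte -> c8rvettegte": "c8rvettegte",
--     "nsx gt3 -> acuransxevo22gt3": "acuransxevo22gt3",
--     "nsx gtd -> acuransxevo22gt3": "acuransxevo22gt3",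
--     "nascar trucks": [
--         "nascar trucks -> trucks toyotatundra2022",
--         "nascar trucks -> trucks fordf150",
--         "nascar trucks -> trucks silverado2019",
--     ],
--     "nascar xfinity": [
--         "nascar xfinity -> stockcars2 supra2019",
--         "nascar xfinity -> stockcars2 mustang2019",
--         "nascar xfinity -> stockcars2 camaro2019",
--     ],
--     "nascar nextgen": [
--         "nascar nextgen -> stockcars chevycamarozl12022",
--         "nascar nextgen -> stockcars fordmustang2022",
--         "nascar nextgen -> stockcars toyotacamry2022",
--     ],
-- }
--
--
--
-- def _clean(text):
--     return text.split("->")[-1].strip().lower()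
--
--
-- def _build_index():
--     index = {}
--     i = 0
--     for key, dest in CAR_MAP.items():
--         if isinstance(dest, list):
--             for m in dest:
--                 c = _clean(m)
--                 index.setdefault(key, (i, c))
--                 index.setdefault(c, (i, c))
--                 i += 1
--         else:
--             d = _clean(dest)
--             index.setdefault(key.split("->")[0].strip().lower(), (i, d))
--             index.setdefault(d, (i, d))
--             i += 1
--     return index
--
--
-- _INDEX = _build_index()
-- _MAXLEN = max(len(k) for k in _INDEX)
--
--
-- def _consider(best, hit):
--     if hit is not None and (best is None or hit[0] < best[0]):
--         return hit
--     return best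
--
--
-- def identify_setup(car_folder, custom_map):
--     parts = car_folder.split("-")
--     name = parts[1].strip().lower() if len(parts) >= 2 else car_folder.lower()
--     if name in custom_map:
--         return custom_map[name]
--     best = None
--     n = len(name)
--     for i in range(n + 1):
--         for j in range(i, min(n, i + _MAXLEN) + 1):
--             best = _consider(best, _INDEX.get(name[i:j]))
--     return None if best is None else best[1]
-- ===== Notes on version B (the rewrite author's own statement) =====
-- stated objective: alternative
-- what changed: B inverts the matching direction: instead of scanning the pattern table and running a substring search for each pattern against the name, it builds a hash index pattern -> (priority, result) once at module load and then enumerates the name's substrings name[i:j] up to the longest key's length, looking each up in the index and keeping the hit of minimal priority (priority = A's table order), so the per-call work is dictionary lookups over the name's substrings rather than per-pattern substring searches.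
import Mathlib
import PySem

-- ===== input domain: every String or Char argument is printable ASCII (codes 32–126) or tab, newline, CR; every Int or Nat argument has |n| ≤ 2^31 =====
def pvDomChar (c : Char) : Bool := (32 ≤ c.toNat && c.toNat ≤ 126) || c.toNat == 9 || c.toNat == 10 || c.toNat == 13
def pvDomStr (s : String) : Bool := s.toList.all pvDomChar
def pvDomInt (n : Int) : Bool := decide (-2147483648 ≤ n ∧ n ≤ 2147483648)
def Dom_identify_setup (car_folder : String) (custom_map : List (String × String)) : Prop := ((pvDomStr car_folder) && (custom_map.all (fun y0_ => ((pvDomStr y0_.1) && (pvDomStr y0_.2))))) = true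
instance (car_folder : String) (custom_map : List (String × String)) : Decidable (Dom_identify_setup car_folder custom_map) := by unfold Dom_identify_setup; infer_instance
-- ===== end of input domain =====

-- B inverts the matching: a hash index pattern -> (priority, result) built once, and the name's
-- substrings looked up in it, keeping the minimal-priority hit (objective: alternative algorithm;
-- return value proved equal to A's).

-- ===== PORT A =====
-- CAR_MAP values are either a single string or a list of strings.
inductive CarDest where
  | one : String → CarDest
  | many : List String → CarDest

def CAR_MAP : List (String × CarDest) := [
  ("ir18 -> dallarair18", CarDest.one "dallarair18"),
  ("aston gt4 -> amvantagegt4", CarDest.one "amvantagegt4"),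
  ("bmw gt4 evo -> bmwm4evogt4", CarDest.one "bmwm4evogt4"),
  ("mclaren gt4 -> mclaren570sgt4", CarDest.one "mclaren570sgt4"),
  ("bmw gt3 -> bmwm4gt3", CarDest.one "bmwm4gt3"),
  ("mclaren gt3 -> mclaren720sgt3", CarDest.one "mclaren720sgt3"),
  ("mclaren gtd -> mclaren720sgt3", CarDest.one "mclaren720sgt3"),
  ("acura gtp -> acuraarx06gtp", CarDest.one "acuraarx06gtp"),
  ("audi gtd -> audir8lmsevo2gt3", CarDest.one "audir8lmsevo2gt3"),
  ("audi gt3 -> audir8lmsevo2gt3", CarDest.one "audir8lmsevo2gt3"),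
  ("bmw gtd -> bmwm4gt3", CarDest.one "bmwm4gt3"),
  ("bmw gtp -> bmwlmdh", CarDest.one "bmwlmdh"),
  ("cadillac gtp -> cadillacvseriesrgtp", CarDest.one "cadillacvseriesrgtp"),
  ("corvette gtd -> chevyvettez06rgt3", CarDest.one "chevyvettez06rgt3"),
  ("corvette gt3 -> chevyvettez06rgt3", CarDest.one "chevyvettez06rgt3"),
  ("dallara lmp2 -> dallarap217", CarDest.one "dallarap217"),
  ("ferrari 499p -> ferrari499p", CarDest.one "ferrari499p"),
  ("ferrari gtd -> ferrari296gt3", CarDest.one "ferrari296gt3"),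
  ("ferrari gt3 -> ferrari296gt3", CarDest.one "ferrari296gt3"),
  ("lamborghini gtd -> lamborghinievogt3", CarDest.one "lamborghinievogt3"),
  ("lamborghini gt3 -> lamborghinievogt3", CarDest.one "lamborghinievogt3"),
  ("mercedes gtd -> mercedesamgevogt3", CarDest.one "mercedesamgevogt3"),
  ("mercedes gt3 -> mercedesamgevogt3", CarDest.one "mercedesamgevogt3"),
  ("mustang gtd -> fordmustanggt3", CarDest.one "fordmustanggt3"),
  ("mustang gt3 -> fordmustanggt3", CarDest.one "fordmustanggt3"),
  ("porsche gtd -> porsche992rgt3", CarDest.one "porsche992rgt3"),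
  ("porsche gt3 -> porsche992rgt3", CarDest.one "porsche992rgt3"),
  ("porsche gtp -> porsche963gtp", CarDest.one "porsche963gtp"),
  ("fia f4 -> formulair04", CarDest.one "formulair04"),
  ("porsche gt4 -> porsche718gt4", CarDest.one "porsche718gt4"),
  ("mercedes gt4 -> mercedesamggt4", CarDest.one "mercedesamggt4"),
  ("lmp3 -> ligierjsp320", CarDest.one "ligierjsp320"),
  ("sfl -> superformulalights324", CarDest.one "superformulalights324"),
  ("pcup -> porsche992cup", CarDest.one "porsche992cup"),
  ("porsche gte -> porsche991rsr", CarDest.one "porsche991rsr"),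
  ("corvette gte -> c8rvettegte", CarDest.one "c8rvettegte"),
  ("nsx gt3 -> acuransxevo22gt3", CarDest.one "acuransxevo22gt3"),
  ("nsx gtd -> acuransxevo22gt3", CarDest.one "acuransxevo22gt3"),
  ("nascar trucks", CarDest.many ["nascar trucks -> trucks toyotatundra2022", "nascar trucks -> trucks fordf150", "nascar trucks -> trucks silverado2019"]),
  ("nascar xfinity", CarDest.many ["nascar xfinity -> stockcars2 supra2019", "nascar xfinity -> stockcars2 mustang2019", "nascar xfinity -> stockcars2 camaro2019"]),
  ("nascar nextgen", CarDest.many ["nascar nextgen -> stockcars chevycamarozl12022", "nascar nextgen -> stockcars fordmustang2022", "nascar nextgen -> stockcars toyotacamry2022"])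
]

-- inner 'for m in dest' loop of A (returns the first matching clean, else none → continue outer)
def identifyInnerA (key : String) (name : String) : List String → Option String
  | [] => none
  | m :: ms =>
    let clean := PySem.Str.lower (PySem.Str.strip (((PySem.Str.split? m "->").getD []).getLastD ""))
    if PySem.Str.isIn key name || PySem.Str.isIn clean name then some clean
    else identifyInnerA key name ms

-- outer 'for key, dest in CAR_MAP.items()' loop of A
def identifyLoopA (name : String) : List (String × CarDest) → Option String
  | [] => none
  | (key, CarDest.many ms) :: rest =>
    match identifyInnerA key name ms with
    | some r => some r
    | none => identifyLoopA name rest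
  | (key, CarDest.one dest) :: rest =>
    let s := PySem.Str.lower (PySem.Str.strip (((PySem.Str.split? key "->").getD []).headD ""))
    let d := PySem.Str.lower (PySem.Str.strip (((PySem.Str.split? dest "->").getD []).getLastD ""))
    if PySem.Str.isIn s name || PySem.Str.isIn d name then some d
    else identifyLoopA name rest

def identify_setup (car_folder : String) (custom_map : List (String × String)) : Option String :=
  let parts := (PySem.Str.split? car_folder "-").getD []
  let name := if 2 ≤ parts.length then PySem.Str.lower (PySem.Str.strip (parts.getD 1 "")) else PySem.Str.lower car_folder
  match PySem.Dict.get? (PySem.Dict.mk custom_map) name with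
  | some v => some v
  | none => identifyLoopA name CAR_MAP

-- ===== PORT B =====
-- _clean(text)
def cleanB (text : String) : String :=
  PySem.Str.lower (PySem.Str.strip (((PySem.Str.split? text "->").getD []).getLastD ""))

-- the 'for m in dest' part of _build_index (state: running priority counter and the dict)
def indexMany (key : String) : List String → Nat → PySem.Dict String (Nat × String) → Nat × PySem.Dict String (Nat × String)
  | [], i, d => (i, d)
  | m :: ms, i, d =>
    let c := cleanB m
    indexMany key ms (i + 1) ((d.setdefault key (i, c)).setdefault c (i, c))

-- _build_index(): pattern -> (priority, result), first occurrence of a pattern wins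
def buildIndex : List (String × CarDest) → Nat → PySem.Dict String (Nat × String) → PySem.Dict String (Nat × String)
  | [], _, d => d
  | (key, CarDest.many ms) :: rest, i, d =>
    let (i', d') := indexMany key ms i d
    buildIndex rest i' d'
  | (key, CarDest.one dest) :: rest, i, d =>
    let dd := cleanB dest
    let s := PySem.Str.lower (PySem.Str.strip (((PySem.Str.split? key "->").getD []).headD ""))
    buildIndex rest (i + 1) ((d.setdefault s (i, dd)).setdefault dd (i, dd))

def INDEX : PySem.Dict String (Nat × String) := buildIndex CAR_MAP 0 PySem.Dict.empty

-- _consider(best, hit): keep the hit of minimal priority, earlier one wins ties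
def considerB (best : Option (Nat × String)) (hit? : Option (Nat × String)) : Option (Nat × String) :=
  match hit? with
  | none => best
  | some hit =>
    match best with
    | none => some hit
    | some b => if hit.1 < b.1 then some hit else best

-- _MAXLEN = max(len(k) for k in _INDEX)
def MAXLEN : Nat := (PySem.List.max? (INDEX.keys.map (fun k => k.toList.length)) (fun x => x)).getD 0

def identify_setup_alt (car_folder : String) (custom_map : List (String × String)) : Option String :=
  let parts := (PySem.Str.split? car_folder "-").getD []
  let name := if 2 ≤ parts.length then PySem.Str.lower (PySem.Str.strip (parts.getD 1 "")) else PySem.Str.lower car_folder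
  match PySem.Dict.get? (PySem.Dict.mk custom_map) name with
  | some v => some v
  | none =>
    let n := PySem.Str.len name
    let best := (PySem.List.pyRange 0 (n + 1)).foldl (fun best i =>
      (PySem.List.pyRange i (min n (i + (MAXLEN : Int)) + 1)).foldl (fun best j =>
        considerB best (INDEX.get? (PySem.Str.slice name (some i) (some j)))) best) none
    best.map (fun b => b.2)

-- ===== PRECONDITION & SPEC =====
def Spec_identify_setup (car_folder : String) (custom_map : List (String × String)) (out : Option String) : Prop := out = identify_setup_alt car_folder custom_map
instance (car_folder : String) (custom_map : List (String × String)) (out : Option String) : Decidable (Spec_identify_setup car_folder custom_map out) := by unfold Spec_identify_setup; infer_instance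

-- ===== CLAIM (what is proved, stated in full; the proofs are below) =====
def Claim_equal_identify_setup : Prop := ∀ (car_folder : String) (custom_map : List (String × String)), Dom_identify_setup car_folder custom_map → Spec_identify_setup car_folder custom_map (identify_setup car_folder custom_map)

-- ===== LEMMAS AND PROOFS =====

-- A's table, flattened to (patterns, result) pairs (proof-side view of A's two-level loop)
def buildTable : List (String × CarDest) → List (List String × String)
  | [] => []
  | (key, CarDest.many ms) :: rest =>
    ms.map (fun m => ([key, cleanB m], cleanB m)) ++ buildTable rest
  | (key, CarDest.one dest) :: rest =>
    ([PySem.Str.lower (PySem.Str.strip (((PySem.Str.split? key "->").getD []).headD "")), cleanB dest], cleanB dest)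
      :: buildTable rest

def TABLE : List (List String × String) := buildTable CAR_MAP

-- first pair whose pattern list matches
def firstMatch (name : String) : List (List String × String) → Option String
  | [] => none
  | (pats, res) :: rest =>
    if pats.any (fun p => PySem.Str.isIn p name) then some res else firstMatch name rest

-- TABLE with its pair index in front
def pairsOf : List (Nat × (List String × String)) := TABLE.zipIdx.map (fun p => (p.2, p.1))

-- hit accumulation step of B, as a function of the query string
def stepB (best : Option (Nat × String)) (s : String) : Option (Nat × String) :=
  considerB best (INDEX.get? s)

-- all name[i:j] queried by B
def queriesB (name : String) : List String :=
  (PySem.List.pyRange 0 (PySem.Str.len name + 1)).flatMap (fun i =>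
    (PySem.List.pyRange i (min (PySem.Str.len name) (i + (MAXLEN : Int)) + 1)).map (fun j =>
      PySem.Str.slice name (some i) (some j)))

-- ---- concrete facts about INDEX and pairsOf ----

set_option maxRecDepth 100000 in
theorem index_keys_nodup : INDEX.keys.Nodup := by decide

-- every index entry comes from its pair: right priority, a pattern of that pair, that pair's result
set_option maxRecDepth 100000 in
theorem index_sound : ∀ e ∈ INDEX.items, ∃ q ∈ pairsOf, q.1 = e.2.1 ∧ e.1 ∈ q.2.1 ∧ q.2.2 = e.2.2 := by decide

-- every pattern of every pair is indexed with priority ≤ that pair's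
set_option maxRecDepth 100000 in
theorem index_complete : ∀ q ∈ pairsOf, ∀ p ∈ q.2.1, ∃ e ∈ INDEX.items, e.1 = p ∧ e.2.1 ≤ q.1 := by decide

-- every indexed pattern fits in the substring-length cap
set_option maxRecDepth 100000 in
theorem index_keys_len : ∀ k ∈ INDEX.keys, k.toList.length ≤ MAXLEN := by decide

theorem pairsOf_increasing : pairsOf.Pairwise (fun a b => a.1 < b.1) := by decide

theorem pairsOf_map_snd : pairsOf.map (·.2) = TABLE := by
  simp [pairsOf, List.map_map, Function.comp_def]

-- ---- A's loop equals the head of the matching pairs ----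

theorem firstMatch_map_append (name key : String) (ms : List String) (t : List (List String × String)) :
    firstMatch name (ms.map (fun m => ([key, cleanB m], cleanB m)) ++ t) =
      match identifyInnerA key name ms with
      | some r => some r
      | none => firstMatch name t := by
  induction ms with
  | nil => simp [identifyInnerA]
  | cons m ms ih =>
    simp only [List.map_cons, List.cons_append, firstMatch, identifyInnerA, cleanB,
      List.any_cons, List.any_nil, Bool.or_false]
    split_ifs with h
    · rfl
    · exact ih

theorem firstMatch_buildTable (name : String) (es : List (String × CarDest)) :
    firstMatch name (buildTable es) = identifyLoopA name es := by
  induction es with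
  | nil => rfl
  | cons e rest ih =>
    obtain ⟨key, dest⟩ := e
    cases dest with
    | one d =>
      simp only [buildTable, identifyLoopA, firstMatch, cleanB, List.any_cons, List.any_nil,
        Bool.or_false]
      split_ifs with h
      · rfl
      · exact ih
    | many ms =>
      simp only [buildTable, identifyLoopA, firstMatch_map_append]
      cases identifyInnerA key name ms with
      | some r => rfl
      | none => exact ih

theorem firstMatch_eq_head_filter (name : String) (T : List (List String × String)) :
    firstMatch name T =
      ((T.filter (fun x => x.1.any (fun p => PySem.Str.isIn p name))).head?).map (·.2) := by
  induction T with
  | nil => rfl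
  | cons x rest ih =>
    obtain ⟨pats, res⟩ := x
    simp only [firstMatch, List.filter_cons]
    split_ifs with h <;> simp [h, ih]

theorem loopA_eq_head (name : String) :
    identifyLoopA name CAR_MAP =
      ((pairsOf.filter (fun q => q.2.1.any (fun p => PySem.Str.isIn p name))).head?).map
        (fun q => q.2.2) := by
  rw [← firstMatch_buildTable, ← TABLE.eq_def, firstMatch_eq_head_filter, ← pairsOf_map_snd,
    List.filter_map, List.head?_map, Option.map_map]
  rfl

-- ---- B's fold computes the minimal-priority candidate ----

theorem fold_stepB_none_iff (Q : List String) (acc : Option (Nat × String)) :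
    Q.foldl stepB acc = none ↔ (acc = none ∧ ∀ s ∈ Q, INDEX.get? s = none) := by
  induction Q generalizing acc with
  | nil => simp
  | cons s Q ih =>
    simp only [List.foldl_cons, ih, List.mem_cons]
    cases hg : INDEX.get? s with
    | none =>
      have he : stepB acc s = acc := by simp [stepB, hg, considerB]
      rw [he]
      constructor
      · rintro ⟨h1, h2⟩
        exact ⟨h1, fun t ht => ht.elim (fun h => h ▸ hg) (h2 t)⟩
      · rintro ⟨h1, h2⟩
        exact ⟨h1, fun t ht => h2 t (Or.inr ht)⟩
    | some h =>
      have hs : stepB acc s = considerB acc (some h) := by simp [stepB, hg]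
      rw [hs]
      have hne : considerB acc (some h) ≠ none := by
        cases acc with
        | none => simp [considerB]
        | some b => simp only [considerB]; split_ifs <;> simp
      constructor
      · rintro ⟨h1, _⟩; exact absurd h1 hne
      · rintro ⟨_, h2⟩
        exact absurd hg (by rw [h2 s (Or.inl rfl)]; simp)

theorem fold_stepB_min (Q : List String) (acc : Option (Nat × String)) (v : Nat × String)
    (hv : Q.foldl stepB acc = some v) :
    (v ∈ acc.toList ∨ ∃ s ∈ Q, INDEX.get? s = some v) ∧
    (∀ b ∈ acc.toList, v.1 ≤ b.1) ∧
    (∀ s ∈ Q, ∀ w, INDEX.get? s = some w → v.1 ≤ w.1) := by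
  induction Q generalizing acc with
  | nil =>
    simp only [List.foldl_nil] at hv
    subst hv
    simp
  | cons s Q ih =>
    simp only [List.foldl_cons] at hv
    cases hg : INDEX.get? s with
    | none =>
      have he : stepB acc s = acc := by simp [stepB, hg, considerB]
      rw [he] at hv
      obtain ⟨hmem, hacc, hq⟩ := ih acc hv
      refine ⟨?_, hacc, ?_⟩
      · rcases hmem with h | ⟨t, ht, hgt⟩
        · exact Or.inl h
        · exact Or.inr ⟨t, List.mem_cons_of_mem _ ht, hgt⟩
      · intro t ht w hw
        rcases List.mem_cons.mp ht with rfl | ht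
        · rw [hg] at hw; cases hw
        · exact hq t ht w hw
    | some h =>
      have hs : stepB acc s = considerB acc (some h) := by simp [stepB, hg]
      rw [hs] at hv
      cases acc with
      | none =>
        obtain ⟨hmem, hacc, hq⟩ := ih (some h) hv
        have hvh : v.1 ≤ h.1 := hacc h (by simp)
        refine ⟨?_, by simp, ?_⟩
        · rcases hmem with hm | ⟨t, ht, hgt⟩
          · simp only [Option.toList_some, List.mem_singleton] at hm
            exact Or.inr ⟨s, List.mem_cons_self .., hm ▸ hg⟩
          · exact Or.inr ⟨t, List.mem_cons_of_mem _ ht, hgt⟩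
        · intro t ht w hw
          rcases List.mem_cons.mp ht with rfl | ht
          · rw [hg] at hw
            injection hw with hw
            subst hw
            omega
          · exact hq t ht w hw
      | some b =>
        simp only [considerB] at hv
        by_cases hlt : h.1 < b.1
        · rw [if_pos hlt] at hv
          obtain ⟨hmem, hacc, hq⟩ := ih (some h) hv
          have hvh : v.1 ≤ h.1 := hacc h (by simp)
          refine ⟨?_, ?_, ?_⟩
          · rcases hmem with hm | ⟨t, ht, hgt⟩
            · simp only [Option.toList_some, List.mem_singleton] at hm
              exact Or.inr ⟨s, List.mem_cons_self .., hm ▸ hg⟩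
            · exact Or.inr ⟨t, List.mem_cons_of_mem _ ht, hgt⟩
          · intro c hc
            simp only [Option.toList_some, List.mem_singleton] at hc
            subst hc
            omega
          · intro t ht w hw
            rcases List.mem_cons.mp ht with rfl | ht
            · rw [hg] at hw
              injection hw with hw
              subst hw
              omega
            · exact hq t ht w hw
        · rw [if_neg hlt] at hv
          obtain ⟨hmem, hacc, hq⟩ := ih (some b) hv
          have hvb : v.1 ≤ b.1 := hacc b (by simp)
          refine ⟨?_, ?_, ?_⟩
          · rcases hmem with hm | ⟨t, ht, hgt⟩
            · simp only [Option.toList_some, List.mem_singleton] at hm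
              exact Or.inl (by simpa using hm)
            · exact Or.inr ⟨t, List.mem_cons_of_mem _ ht, hgt⟩
          · intro c hc
            simp only [Option.toList_some, List.mem_singleton] at hc
            subst hc
            omega
          · intro t ht w hw
            rcases List.mem_cons.mp ht with rfl | ht
            · rw [hg] at hw
              injection hw with hw
              subst hw
              omega
            · exact hq t ht w hw

-- ---- the queried strings are exactly the infixes of name ----

theorem queriesB_infix (name : String) : ∀ s ∈ queriesB name, s.toList <:+: name.toList := by
  intro s hs
  simp only [queriesB, List.mem_flatMap, List.mem_map] at hs
  obtain ⟨i, hi, j, hj, rfl⟩ := hs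
  rw [PySem.List.mem_pyRange_one] at hi hj
  rw [PySem.Str.toList_slice, PySem.Chars.slice_eq_listSlice,
    PySem.List.slice_toNat _ (by omega) (by omega)]
  exact (List.take_prefix _ _).isInfix.trans (List.drop_suffix _ _).isInfix

set_option maxRecDepth 100000 in
theorem mem_queriesB (name : String) (p : String) (h : p.toList <:+: name.toList)
    (hplen : p.toList.length ≤ MAXLEN) : p ∈ queriesB name := by
  obtain ⟨s, t, hst⟩ := h
  have hlen : name.toList.length = s.length + p.toList.length + t.length := by
    rw [← hst]; simp; omega
  simp only [queriesB, List.mem_flatMap, List.mem_map]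
  refine ⟨(s.length : Int), ?_, ⟨(s.length + p.toList.length : Nat), ?_, ?_⟩⟩
  · rw [PySem.List.mem_pyRange_one, PySem.Str.len_eq]; constructor <;> [positivity; omega]
  · rw [PySem.List.mem_pyRange_one, PySem.Str.len_eq]
    constructor
    · exact_mod_cast Nat.le_add_right _ _
    · push_cast; omega
  · apply String.toList_inj.mp
    rw [PySem.Str.toList_slice, PySem.Chars.slice_eq_listSlice]
    have : ((s.length + p.toList.length : Nat) : Int) = ((s.length + p.toList.length : Nat) : Int) := rfl
    rw [show ((s.length : Nat) : Int) = ((s.length : Nat) : Int) from rfl]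
    rw [PySem.List.slice_natCast]
    rw [← hst, List.append_assoc, List.drop_left]
    have : s.length + p.toList.length - s.length = p.toList.length := by omega
    rw [this, List.take_left]

-- ---- main equivalence of the two scans ----

set_option maxHeartbeats 1000000 in
theorem scan_eq (name : String) :
    identifyLoopA name CAR_MAP = ((queriesB name).foldl stepB none).map (fun b => b.2) := by
  rw [loopA_eq_head]
  have hMsub := List.Pairwise.sublist
    (List.filter_sublist (p := fun q => q.2.1.any (fun p => PySem.Str.isIn p name)) (l := pairsOf))
    pairsOf_increasing
  cases hM : (pairsOf.filter (fun q => q.2.1.any (fun p => PySem.Str.isIn p name))).head? with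
  | none =>
    have hMnil := List.head?_eq_none_iff.mp hM
    have hnone : (queriesB name).foldl stepB none = none := by
      rw [fold_stepB_none_iff]
      refine ⟨rfl, fun s hs => ?_⟩
      cases hg : INDEX.get? s with
      | none => rfl
      | some v =>
        obtain ⟨q, hqmem, _, hpat, _⟩ :
            ∃ q ∈ pairsOf, q.1 = v.1 ∧ s ∈ q.2.1 ∧ q.2.2 = v.2 :=
          index_sound (s, v) (PySem.Dict.mem_items_of_get?_eq_some INDEX hg)
        have hin : PySem.Str.isIn s name = true :=
          (PySem.Str.isIn_iff_infix s name).mpr (queriesB_infix name s hs)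
        have : q ∈ pairsOf.filter (fun q => q.2.1.any (fun p => PySem.Str.isIn p name)) :=
          List.mem_filter.mpr ⟨hqmem, List.any_eq_true.mpr ⟨s, hpat, hin⟩⟩
        rw [hMnil] at this
        cases this
    rw [hnone]
    rfl
  | some q0 =>
    obtain ⟨M', hM'⟩ := List.head?_eq_some_iff.mp hM
    have hq0 : q0 ∈ pairsOf.filter (fun q => q.2.1.any (fun p => PySem.Str.isIn p name)) := by
      rw [hM']; exact List.mem_cons_self ..
    obtain ⟨hq0mem, hq0match⟩ := List.mem_filter.mp hq0
    obtain ⟨p, hp, hpin⟩ := List.any_eq_true.mp hq0match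
    obtain ⟨e, hemem, hekey, hele⟩ := index_complete q0 hq0mem p hp
    have hpkey : p ∈ INDEX.keys := by
      rw [← hekey]
      simp only [PySem.Dict.keys]
      exact List.mem_map_of_mem hemem
    have hpq : p ∈ queriesB name :=
      mem_queriesB name p ((PySem.Str.isIn_iff_infix p name).mp hpin) (index_keys_len p hpkey)
    have hget : INDEX.get? e.1 = some e.2 :=
      (PySem.Dict.get?_eq_some_iff_mem_items INDEX e.1 e.2 index_keys_nodup).mpr hemem
    cases hr : (queriesB name).foldl stepB none with
    | none =>
      obtain ⟨-, hall⟩ := (fold_stepB_none_iff _ _).mp hr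
      rw [hekey] at hget
      rw [hall p hpq] at hget
      cases hget
    | some v =>
      obtain ⟨hmem, -, hmin⟩ := fold_stepB_min _ _ _ hr
      rcases hmem with hm | ⟨s, hsq, hgs⟩
      · cases hm
      · obtain ⟨qv, hqvmem, hqvi, hqvpat, hqvres⟩ :
            ∃ qv ∈ pairsOf, qv.1 = v.1 ∧ s ∈ qv.2.1 ∧ qv.2.2 = v.2 :=
          index_sound (s, v) (PySem.Dict.mem_items_of_get?_eq_some INDEX hgs)
        have hsin : PySem.Str.isIn s name = true :=
          (PySem.Str.isIn_iff_infix s name).mpr (queriesB_infix name s hsq)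
        have hqvM : qv ∈ pairsOf.filter (fun q => q.2.1.any (fun p => PySem.Str.isIn p name)) :=
          List.mem_filter.mpr ⟨hqvmem, List.any_eq_true.mpr ⟨s, hqvpat, hsin⟩⟩
        have hvle : v.1 ≤ q0.1 := by
          have h1 : v.1 ≤ e.2.1 := hmin e.1 (hekey ▸ hpq) e.2 hget
          omega
        have hqv0 : qv = q0 := by
          rw [hM'] at hqvM hMsub
          rcases List.mem_cons.mp hqvM with h | h
          · exact h
          · exact absurd (List.rel_of_pairwise_cons hMsub h) (by omega)
        simp only [Option.map_some]
        rw [← hqvres, hqv0]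

-- bridge: B's nested fold over ranges is the flat fold over all queried substrings
theorem alt_fold_eq (name : String) :
    ((PySem.List.pyRange 0 (PySem.Str.len name + 1)).foldl (fun best i =>
      (PySem.List.pyRange i (min (PySem.Str.len name) (i + (MAXLEN : Int)) + 1)).foldl (fun best j =>
        considerB best (INDEX.get? (PySem.Str.slice name (some i) (some j)))) best) none) =
    (queriesB name).foldl stepB none := by
  unfold queriesB stepB
  rw [List.foldl_flatMap]
  simp only [List.foldl_map]

-- ===== VERDICT (by name: the statement is the Claim_ definition above) =====
theorem identify_setup_spec : Claim_equal_identify_setup := by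
  intro car_folder custom_map _
  unfold Spec_identify_setup identify_setup identify_setup_alt
  simp only [alt_fold_eq, ← scan_eq]
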